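-- pv_equiv track=rewrite | github.com/Yunoya18/PSCP | Lab 6/MAC.py | check_hex
-- ===== SOURCE A (Python) =====
-- def check_hex(text):
--     """check hex"""
--     for i in text:
--         if ord(i) not in range(48, 58)\
--             and ord(i) not in range(65, 71)\
--             and ord(i) not in range(97, 103)\
--             and ord(i) != 45 and ord(i) != 46 and ord(i) != 58:
--             return "no"
--     return ""
-- ===== SOURCE B (Python) =====
-- import re
--
-- _HEX_SEP = re.compile(r'[0-9A-Fa-f.:-]*')
--
-- def check_hex(text):
--     """check hex"""
--     return "" if _HEX_SEP.fullmatch(text) else "no"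
-- ===== Notes on version B (the rewrite author's own statement) =====
-- stated objective: idiomatic
-- what changed: Replaces the per-character early-exit loop with four ord() range tests by a single regular-expression fullmatch of the character class [0-9A-Fa-f.:-]*.
import Mathlib
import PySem

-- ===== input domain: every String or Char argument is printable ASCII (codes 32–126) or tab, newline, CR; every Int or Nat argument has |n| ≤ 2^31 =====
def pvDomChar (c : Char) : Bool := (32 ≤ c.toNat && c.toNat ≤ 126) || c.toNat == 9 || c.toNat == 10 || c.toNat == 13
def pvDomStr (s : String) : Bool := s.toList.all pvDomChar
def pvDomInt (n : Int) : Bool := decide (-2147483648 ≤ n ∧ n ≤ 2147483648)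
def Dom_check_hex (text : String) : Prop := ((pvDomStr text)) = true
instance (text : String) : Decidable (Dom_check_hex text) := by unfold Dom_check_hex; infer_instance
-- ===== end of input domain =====

-- B replaces A's per-character early-exit loop with a regex-style full match of the
-- character class [0-9A-Fa-f.:-]* (idiomatic; same cost).

-- ===== PORT A =====
-- A's loop: scan chars, early-return "no" on the first char failing the four ord tests.
def check_hex_go (cs : List Char) : String :=
  match cs with
  | [] => ""
  | i :: rest =>
      if !(48 ≤ (i.toNat : Int) && (i.toNat : Int) < 58)
         && !(65 ≤ (i.toNat : Int) && (i.toNat : Int) < 71)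
         && !(97 ≤ (i.toNat : Int) && (i.toNat : Int) < 103)
         && (i.toNat : Int) != 45 && (i.toNat : Int) != 46 && (i.toNat : Int) != 58
      then "no"
      else check_hex_go rest

def check_hex (text : String) : String := check_hex_go text.toList

-- ===== PORT B =====
-- the regex character class [0-9A-Fa-f.:-]
def hexClassChar (c : Char) : Bool :=
  ('0' ≤ c && c ≤ '9') || ('A' ≤ c && c ≤ 'F') || ('a' ≤ c && c ≤ 'f')
    || c == '.' || c == ':' || c == '-'

-- fullmatch of [0-9A-Fa-f.:-]* = every character is in the class
def check_hex_alt (text : String) : String :=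
  if text.toList.all hexClassChar then "" else "no"

-- ===== PRECONDITION & SPEC =====
def Spec_check_hex (text : String) (out : String) : Prop := out = check_hex_alt text
instance (text : String) (out : String) : Decidable (Spec_check_hex text out) := by unfold Spec_check_hex; infer_instance

-- ===== CLAIM (what is proved, stated in full; the proofs are below) =====
def Claim_equal_check_hex : Prop := ∀ (text : String), Dom_check_hex text → Spec_check_hex text (check_hex text)

-- ===== LEMMAS AND PROOFS =====
theorem check_hex_bad_eq_not_class (c : Char) :
    (!(48 ≤ (c.toNat : Int) && (c.toNat : Int) < 58)
      && !(65 ≤ (c.toNat : Int) && (c.toNat : Int) < 71)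
      && !(97 ≤ (c.toNat : Int) && (c.toNat : Int) < 103)
      && (c.toNat : Int) != 45 && (c.toNat : Int) != 46 && (c.toNat : Int) != 58)
    = !hexClassChar c := by
  rw [Bool.eq_iff_iff]
  simp only [hexClassChar, Char.le_def, UInt32.le_iff_toNat_le, Char.toNat, bne,
    Char.ext_iff, ← UInt32.toNat_inj, Bool.and_eq_true, Bool.or_eq_true, Bool.not_eq_true',
    beq_eq_false_iff_ne, ne_eq, Bool.not_and, Bool.not_or,
    decide_eq_false_iff_not]
  have e0 : '0'.val.toNat = 48 := rfl
  have e9 : '9'.val.toNat = 57 := rfl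
  have eA : 'A'.val.toNat = 65 := rfl
  have eF : 'F'.val.toNat = 70 := rfl
  have ea : 'a'.val.toNat = 97 := rfl
  have ef : 'f'.val.toNat = 102 := rfl
  have ed : '.'.val.toNat = 46 := rfl
  have ec : ':'.val.toNat = 58 := rfl
  have em : '-'.val.toNat = 45 := rfl
  omega

theorem check_hex_go_eq (cs : List Char) :
    check_hex_go cs = (if cs.all hexClassChar then "" else "no") := by
  induction cs with
  | nil => rfl
  | cons c rest ih =>
      rw [check_hex_go, check_hex_bad_eq_not_class, List.all_cons]
      cases h : hexClassChar c <;> simp [ih]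

-- ===== VERDICT (by name: the statement is the Claim_ definition above) =====
theorem check_hex_spec : Claim_equal_check_hex := by
  intro text _
  unfold Spec_check_hex check_hex check_hex_alt
  exact check_hex_go_eq text.toList
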